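/- GENERATED by mk_final_copies.py from the proof of the farm's unit `start_decoder.C6d` (farm:start_decoder.C6d.1: Lemmas.lean) as the
   re-elaboration sweep compiled it — do not edit. -/
import Asan.CheckWalk
import Vorbis.Spec.Units.start_decoder_C6d
import Vorbis.Spec.StartDecoderCarry
import Vorbis.Spec.StartDecoderC7

open X86 X86.User Asan Vorbis Vorbis.Spec Vorbis.Spec.StartDecoder

set_option maxRecDepth 100000
set_option maxHeartbeats 4000000

namespace Vorbis.Spec.start_decoder_C6d

/-! ### 1. A whole `call setup_temp_malloc` (the tree has `Cur.alloc_call` for `setup_malloc` only) -/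

/-- **A window of an allocator's footprint does not meet the arena's buffer** `[B, B + L)`: the stack is off the arena, `*f` lies
outside it, the shadow lies above it. WHEN: the bytes of a TEMP block (`lengths`) over an allocator call. -/
theorem c6d_win_off_arena {g : Ghost} {A : Arena × List Obj} {x : Span} (hpos : Pos g A) (k : AllocWin g A x) :
    x.hi ≤ A.1.B ∨ A.1.B + A.1.L ≤ x.lo := by
  obtain ⟨p1, p2, p3, p4, p5, p6, p7, p8, p9, p10, p11, p12, p13, p14⟩ := hpos
  unfold AllocWin at k
  omega

/-- **The push of the return address followed by `setup_temp_malloc`'s footprint, as ONE footprint over the cut point's memory**,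
every window an `AllocWin` (the twin of the tree's `alloc_call_same`; the shadow window under `hsub`). -/
theorem c6d_temp_call_same {g : Ghost} {A : Arena × List Obj} {m ms mr : Mem} {a : Word} {x sp f' : Nat} {sh : Span}
    (hp : Pos g A) (hmem : ms = m.writeLE a 8 x) (ha : a.toNat + 8 = g.R) (hsp : sp + 8 = g.R) (hf : f' = g.f)
    (hs : Mem.SameExcept [⟨sp - 80, sp⟩, ⟨f' + 132, f' + 136⟩, sh] ms mr)
    (hsub : 0xC00000 + A.1.B / 8 ≤ sh.lo ∧ sh.hi ≤ 0xC00000 + (A.1.B + A.1.L + 7) / 8) :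
    ∃ ws, Mem.SameExcept ws m mr ∧ ∀ w, w ∈ ws → AllocWin g A w := by
  have p1 := hp.r_eq
  have p2 := hp.ra_hi
  have p3 := hp.ra_lo
  refine ⟨[⟨g.R - 88, g.R⟩, ⟨g.f + 132, g.f + 136⟩, sh], ?_, ?_⟩
  · refine Mem.SameExcept.trans (ν := ms) ?_ ?_
    · rw [hmem]
      apply Mem.SameExcept.writeLE
      · omega
      · refine ⟨_, List.mem_cons_self, ?_, ?_⟩
        · simp only []
          omega
        · simp only []
          omega
    · apply hs.mono
      intro w hw b h1 h2
      simp only [List.mem_cons, List.mem_nil_iff, or_false] at hw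
      rcases hw with rfl | rfl | rfl
      · simp only [] at h1 h2
        exact ⟨_, List.mem_cons_self, by simp only []; omega, by simp only []; omega⟩
      · simp only [] at h1 h2
        exact ⟨_, List.mem_cons_of_mem _ List.mem_cons_self, by simp only []; omega, by simp only []; omega⟩
      · exact ⟨_, List.mem_cons_of_mem _ (List.mem_cons_of_mem _ List.mem_cons_self), h1, h2⟩
  · intro w hw
    simp only [List.mem_cons, List.mem_nil_iff, or_false] at hw
    unfold AllocWin
    rcases hw with rfl | rfl | rfl
    · left
      simp only []
      omega
    · right
      right
      left
      simp only []
      omega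
    · right
      right
      right
      exact hsub

/-- **The shadow window of `setup_temp_malloc`'s footprint is a window of the arena's shadow**, when the request fits (the twin of
the tree's `shadow_win_of_fits`). -/
theorem c6d_shadow_win_of_fits {A : Arena} {others : List Obj} {m : Mem} {f n : Nat} (ha : ArenaOK A others m f)
    (hfit : A.Fits n) :
    0xC00000 + A.B / 8 ≤ (shadowSpan (A.B + (A.T - (r8 n + 32))) (A.B + (A.T - (r8 n + 32)) + n)).lo ∧
      (shadowSpan (A.B + (A.T - (r8 n + 32))) (A.B + (A.T - (r8 n + 32)) + n)).hi ≤ 0xC00000 + (A.B + A.L + 7) / 8 := by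
  have h2 := ha.bounds
  have hl := le_r8 n
  unfold Arena.Fits at hfit
  simp only [shadowSpan]
  omega

/-- **A WHOLE `call setup_temp_malloc` THAT SUCCEEDS, in the walker's terms** (the twin of the tree's `Cur.alloc_call`): `v` = the
cut point (its `Frame`, `Cur`), `s` = the state at the callee's entry (`hmem`: the pushed return address), `sr` = the returned state;
`hs` = `w_same` after `simp only [X86.User.Spec.footprint, vspec] at w_same`; `hpost` = `w_post`. Gives `Frame` and CUR(i) at `sr`
for the grown ghost `(A.1.pushTemp n, A.1.newTempObj n :: A.2)`, `cb(i)` unmoved, every setup block kept, rax = the new temp block,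
and the ONE footprint of the call over `v.mem` (for the bytes of the older temp blocks). -/
theorem c6d_temp_call {u₀ : State} {g : Ghost} {pc pc' : Word} {i : Nat} {A2 A3 Ai : Arena} {A : Arena × List Obj}
    {v s sr : State} {a : Word} {x : Nat} (h : Frame u₀ g pc A v) (hc : Cur g i A2 A3 Ai A v)
    (hmem : s.mem = v.mem.writeLE a 8 x) (ha : a.toNat + 8 = g.R) (hsp : (s.reg .rsp).toNat + 8 = g.R)
    (hrdi : (s.reg .rdi).toNat = g.f)
    (hs : Mem.SameExcept [⟨(s.reg .rsp).toNat - 80, (s.reg .rsp).toNat⟩,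
      ⟨(s.reg .rdi).toNat + 132, (s.reg .rdi).toNat + 136⟩,
      shadowSpan (A.1.B + (A.1.T - (r8 ((s.reg .rsi).toNat % 2 ^ 32) + 32)))
        (A.1.B + (A.1.T - (r8 ((s.reg .rsi).toNat % 2 ^ 32) + 32)) + (s.reg .rsi).toNat % 2 ^ 32)] s.mem sr.mem)
    (hpost : (setup_temp_malloc.spec A.2 g.frames' A.1).post s sr) (hfit : A.1.Fits ((s.reg .rsi).toNat % 2 ^ 32))
    (hrip : sr.rip = pc') (hrsp : sr.reg .rsp = v.reg .rsp) (hcode : CodeOK u₀ sr.mem) (hinv : abiInv sr)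
    (hr14 : sr.reg .r14 = v.reg .r14) :
    Frame u₀ g pc' (A.1.pushTemp ((s.reg .rsi).toNat % 2 ^ 32), A.1.newTempObj ((s.reg .rsi).toNat % 2 ^ 32) :: A.2) sr ∧
      Cur g i A2 A3 Ai (A.1.pushTemp ((s.reg .rsi).toNat % 2 ^ 32), A.1.newTempObj ((s.reg .rsi).toNat % 2 ^ 32) :: A.2) sr ∧
      g.cb sr.mem i = g.cb v.mem i ∧ AllKept A.1.Blk v.mem sr.mem ∧
      (sr.reg .rax).toNat = A.1.B + (A.1.T - (r8 ((s.reg .rsi).toNat % 2 ^ 32) + 32)) ∧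
      ∃ ws, Mem.SameExcept ws v.mem sr.mem ∧ ∀ w, w ∈ ws → AllocWin g A w := by
  obtain ⟨hrax, ha', hsh'⟩ := hpost.1 hfit
  rw [hrdi] at ha'
  rw [hsp] at hsh'
  have hpos := Pos.of h hc
  obtain ⟨ws, hall, hok⟩ := c6d_temp_call_same hpos hmem ha hsp hrdi hs (c6d_shadow_win_of_fits hc.sd.arena hfit)
  have hext := A.1.extends_pushTemp ((s.reg .rsi).toNat % 2 ^ 32)
  have hand' : g.Hand (A.1.pushTemp ((s.reg .rsi).toNat % 2 ^ 32), A.1.newTempObj ((s.reg .rsi).toNat % 2 ^ 32) :: A.2) :=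
    HandOK.mono hc.hand hext (fun o ho => List.mem_cons_of_mem _ ho)
  have hoff' : ∀ o, o ∈ A.1.newTempObj ((s.reg .rsi).toNat % 2 ^ 32) :: A.2 → L.textHi ≤ o.base := by
    intro o ho
    rcases List.mem_cons.mp ho with rfl | hold
    · have ht := hc.hand.arenaText
      show L.textHi ≤ A.1.B + (A.1.T - (r8 ((s.reg .rsi).toNat % 2 ^ 32) + 32))
      omega
    · exact h.offText o hold
  have hx : BlkLive (listBlk g.extra)
      (g.Live (A.1.pushTemp ((s.reg .rsi).toNat % 2 ^ 32), A.1.newTempObj ((s.reg .rsi).toNat % 2 ^ 32) :: A.2)) := by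
    have hl : BlkLive (listBlk g.extra) (g.Live A) := hc.sd.env.live.sub (fun B hB => runBlk_extra hB)
    refine hl.mono (fun y hy => ?_)
    obtain ⟨o, ho, hb⟩ := hy
    refine ⟨o, ?_, hb⟩
    rcases List.mem_append.mp ho with hst | hoth
    · exact List.mem_append_left _ hst
    · exact List.mem_append_right _ (List.mem_cons_of_mem _ hoth)
  obtain ⟨r1, r2, r3, r4⟩ := Cur.free h hc hall hok hext ha' hsh' hand' hx hoff' hrip hrsp hcode hinv hr14
  exact ⟨r1, r2, r3, r4, hrax, ws, hall, hok⟩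

/-- **A WHOLE `call setup_temp_malloc` THAT FAILS** (`¬ A.1.Fits n`: rax = 0, the arena and the shadow as they were, nothing
written but the stack; the twin of the tree's `Cur.alloc_fail_any`): `Frame` and CUR(i) at the returned state for the SAME ghost. -/
theorem c6d_temp_fail {u₀ : State} {g : Ghost} {pc pc' : Word} {i : Nat} {A2 A3 Ai : Arena} {A : Arena × List Obj}
    {v s sr : State} {a : Word} {x : Nat} (h : Frame u₀ g pc A v) (hc : Cur g i A2 A3 Ai A v)
    (hmem : s.mem = v.mem.writeLE a 8 x) (ha : a.toNat + 8 = g.R) (hsp : (s.reg .rsp).toNat + 8 = g.R)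
    (hrdi : (s.reg .rdi).toNat = g.f)
    (hpost : (setup_temp_malloc.spec A.2 g.frames' A.1).post s sr) (hfit : ¬ A.1.Fits ((s.reg .rsi).toNat % 2 ^ 32))
    (hrip : sr.rip = pc') (hrsp : sr.reg .rsp = v.reg .rsp) (hcode : CodeOK u₀ sr.mem) (hinv : abiInv sr)
    (hr14 : sr.reg .r14 = v.reg .r14) :
    Frame u₀ g pc' A sr ∧ Cur g i A2 A3 Ai A sr ∧ g.cb sr.mem i = g.cb v.mem i ∧ AllKept A.1.Blk v.mem sr.mem ∧
      sr.reg .rax = 0 ∧ ∃ ws, Mem.SameExcept ws v.mem sr.mem ∧ ∀ w, w ∈ ws → AllocWin g A w := by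
  obtain ⟨hrax, ha', hun, hfailSame⟩ := hpost.2 hfit
  rw [hrdi] at ha'
  have hpos := Pos.of h hc
  have p1 := hpos.r_eq
  have p2 := hpos.ra_hi
  have p3 := hpos.ra_lo
  have hun0 : ShadowUntouched v.mem s.mem := by
    rw [hmem]
    exact Mem.eqOn_writeLE v.mem a 8 x 0xC00000 0x200000 (by omega) (by omega)
  have hunAll : ShadowUntouched v.mem sr.mem := Mem.EqOn.trans hun0 hun
  have hsh' : ShadowInv A.2 g.frames' g.R sr.mem := h.shadow.untouched hunAll
  have hx : BlkLive (listBlk g.extra) (g.Live A) := hc.sd.env.live.sub (fun B hB => runBlk_extra hB)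
  have hall : Mem.SameExcept [⟨g.R - 88, g.R⟩] v.mem sr.mem := by
    refine Mem.SameExcept.trans (ν := s.mem) ?_ ?_
    · rw [hmem]
      apply Mem.SameExcept.writeLE
      · omega
      · refine ⟨_, List.mem_cons_self, ?_, ?_⟩
        · simp only []
          omega
        · simp only []
          omega
    · apply hfailSame.mono
      intro w hw b h1 h2
      rw [List.mem_singleton.mp hw] at h1 h2
      simp only [] at h1 h2
      exact ⟨_, List.mem_cons_self, by simp only []; omega, by simp only []; omega⟩
  have hok : ∀ w, w ∈ [(⟨g.R - 88, g.R⟩ : Span)] → AllocWin g A w := by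
    intro w hw
    rw [List.mem_singleton.mp hw]
    unfold AllocWin
    left
    simp only []
    omega
  obtain ⟨r1, r2, r3, r4⟩ := Cur.free h hc hall hok (Arena.Extends.refl _) ha' hsh' hc.hand hx h.offText hrip hrsp hcode
    hinv hr14
  exact ⟨r1, r2, r3, r4, hrax, _, hall, hok⟩

/-- **A temp block of the arena is kept by an allocator call** (its footprint: the stack, two offsets of `*f`, shadow bytes — none
meets the arena's buffer). WHEN: the bytes of `lengths` = P1 (L(E), CNT are read by C7) over `setup_temp_malloc`. -/
theorem c6d_tblock_kept {g : Ghost} {A : Arena × List Obj} {m m' : Mem} {f p n : Nat} {ws : List Span} (hpos : Pos g A)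
    (ha : ArenaOK A.1 A.2 m f) (hs : Mem.SameExcept ws m m') (hok : ∀ w, w ∈ ws → AllocWin g A w)
    (hT : A.1.TBlock p n) : (Block.mk p n).Kept m m' := by
  have hr := ha.tblock_range hT
  have hl := le_r8 n
  have hb := ha.bounds
  apply Block.Kept.of_sameExcept hs _ (by simp only []; omega)
  intro x hx
  have k := c6d_win_off_arena hpos (hok x hx)
  simp only []
  omega

/-- **The ghost of a successful `setup_temp_malloc(f, n)`**: the new temp block FIRST, then the blocks that were outstanding
(`hrax`: the first conjunct of the post's success clause). -/
theorem c6d_temps {A : Arena} {n : Nat} {x : Word} {rest : List (Nat × Nat)} (hT : TempsAre A rest)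
    (hrax : x.toNat = A.B + (A.T - (r8 n + 32))) : TempsAre (A.pushTemp n) ((x.toNat, n) :: rest) := by
  obtain ⟨h1, h2⟩ := hT
  unfold TempsAre Arena.pushTemp
  simp only [List.map_cons, List.mem_cons]
  refine ⟨?_, ?_⟩
  · rw [h1, hrax]
    congr 2
    omega
  · intro b hb
    rcases hb with rfl | hb
    · simp only []
      omega
    · exact h2 b hb

/-! ### 2. The store `c->codewords = rbp` (offset 40 of the struct): the lemmas of the accepted proof of start_decoder.C6b -/

/-- A window of segment C6d before its allocator call: the stack below the steady rsp (the pushed return addresses of the check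
calls and of `error`, their frames), the pointer field at offset `o` of the struct `cb(i)` at `c` (`o = 40`: `codewords`),
`f->eof` / `f->error` `[f + 136, f + 144)`. -/
def C6dWin (g : Ghost) (c o : Nat) (w : Span) : Prop :=
  (g.R - 408 ≤ w.lo ∧ w.hi ≤ g.R) ∨ (c + o ≤ w.lo ∧ w.hi ≤ c + o + 8) ∨ (g.f + 136 ≤ w.lo ∧ w.hi ≤ g.f + 144)

/-- **THE INVARIANT SIDE OF A SEGMENT THAT STORES ONE POINTER FIELD OF THE STRUCT `cb(i)`** (`c6b_carry` of farm/worked/start_decoder.C6b):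
from `Frame` and CUR(i) at `v` and a later state `s` whose memory differs from `v.mem` only in windows `C6dWin` (no shadow byte):
`Frame` at the new program counter, CUR(i), `cb(i)` unmoved, and the struct's bytes before and after the field are kept. -/
theorem c6d_carry {u₀ : State} {g : Ghost} {pc pc' : Word} {i : Nat} {A2 A3 Ai : Arena} {A : Arena × List Obj} {v s : State}
    {ws : List Span} (o : Nat) (ho : o + 8 ≤ 2120) (hfr : Frame u₀ g pc A v) (hcur : Cur g i A2 A3 Ai A v)
    (hs : Mem.SameExcept ws v.mem s.mem) (hun : ShadowUntouched v.mem s.mem)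
    (hok : ∀ w, w ∈ ws → C6dWin g (g.cb v.mem i) o w)
    (hrip : s.rip = pc') (hrsp : s.reg .rsp = v.reg .rsp) (hcode : CodeOK u₀ s.mem) (hinv : abiInv s)
    (hr14 : s.reg .r14 = v.reg .r14) :
    Frame u₀ g pc' A s ∧ Cur g i A2 A3 Ai A s ∧ g.cb s.mem i = g.cb v.mem i ∧
      (⟨g.cb v.mem i, o⟩ : Block).Kept v.mem s.mem ∧ (⟨g.cb v.mem i + o + 8, 2120 - o - 8⟩ : Block).Kept v.mem s.mem := by
  have hpos : Pos g A := Pos.of hfr hcur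
  have hm0 : MInv g i A2 A3 Ai A v.mem := MInv.of hfr hcur
  have hcw := hm0.c_where
  have p1 := hpos.r_eq
  have p2 := hpos.ra_lo
  have p3 := hpos.ra_hi
  have p4 := hpos.f_lo
  have p5 := hpos.f_hi
  have p6 := hpos.f_stack
  have p7 := hpos.objOut
  have p9 := hpos.ar_lo
  have p10 := hpos.ar_hi
  have p11 := hpos.ar_stack
  have hok0 : ∀ w, w ∈ ws → OkWin g Ai A (g.cb v.mem i) w := by
    intro w hw
    have k := hok w hw
    unfold C6dWin at k
    left
    unfold OkWin0
    omega
  have hb : Bits (g.Blk A) g.len s.mem g.f := by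
    apply bits_kept hpos hcur.sd.bits hs
    intro w hw
    have k := hok w hw
    unfold C6dWin at k
    omega
  have hfr' := Frame.step hfr hcur hs hun hok0 hb hrip hrsp hcode hinv
  obtain ⟨hcur', hcb⟩ := Cur.step hfr hcur hs hun hok0 hb hr14
  refine ⟨hfr', hcur', hcb, ?_, ?_⟩
  · apply Block.Kept.of_sameExcept hs _ (by simp only []; omega)
    intro w hw
    have k := hok w hw
    unfold C6dWin at k
    simp only []
    omega
  · apply Block.Kept.of_sameExcept hs _ (by simp only []; omega)
    intro w hw
    have k := hok w hw
    unfold C6dWin at k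
    simp only []
    omega

/-- **The fields of the book that the store `c->codewords = p` does not touch** read the same (the bytes `[c, c + 40)` and
`[c + 48, c + 2120)` are kept). -/
theorem c6d_fields {m m' : Mem} {c : Nat} (hlo : (⟨c, 40⟩ : Block).Kept m m')
    (hhi : (⟨c + 40 + 8, 2120 - 40 - 8⟩ : Block).Kept m m') :
    Codebook.dimensions m' c = Codebook.dimensions m c ∧ Codebook.entries m' c = Codebook.entries m c ∧
      Codebook.codeword_lengths m' c = Codebook.codeword_lengths m c ∧ Codebook.sparse m' c = Codebook.sparse m c ∧
      Codebook.sorted_entries m' c = Codebook.sorted_entries m c ∧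
      (Fresh5 m c → Fresh5 m' c) := by
  have e_dim : Codebook.dimensions m' c = Codebook.dimensions m c := by
    simp only [vacc, voff]
    exact hlo.i32 _ (by simp only []; omega) (by simp only []; omega)
  have e_ent : Codebook.entries m' c = Codebook.entries m c := by
    simp only [vacc, voff]
    exact hlo.i32 _ (by simp only []; omega) (by simp only []; omega)
  have e_cl : Codebook.codeword_lengths m' c = Codebook.codeword_lengths m c := by
    simp only [vacc, voff]
    exact hlo.u64 _ (by simp only []; omega) (by simp only []; omega)
  have e_sp : Codebook.sparse m' c = Codebook.sparse m c := by
    simp only [vacc, voff]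
    exact hlo.u8 _ (by simp only []; omega) (by simp only []; omega)
  have e_lt : Codebook.lookup_type m' c = Codebook.lookup_type m c := by
    simp only [vacc, voff]
    exact hlo.u8 _ (by simp only []; omega) (by simp only []; omega)
  have e_lv : Codebook.lookup_values m' c = Codebook.lookup_values m c := by
    simp only [vacc, voff]
    exact hlo.u32 _ (by simp only []; omega) (by simp only []; omega)
  have e_mu : Codebook.multiplicands m' c = Codebook.multiplicands m c := by
    simp only [vacc, voff]
    exact hlo.u64 _ (by simp only []; omega) (by simp only []; omega)
  have e_sc : Codebook.sorted_codewords m' c = Codebook.sorted_codewords m c := by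
    simp only [vacc, voff]
    exact hhi.u64 _ (by simp only []; omega) (by simp only []; omega)
  have e_sv : Codebook.sorted_values m' c = Codebook.sorted_values m c := by
    simp only [vacc, voff]
    exact hhi.u64 _ (by simp only []; omega) (by simp only []; omega)
  have e_se : Codebook.sorted_entries m' c = Codebook.sorted_entries m c := by
    simp only [vacc, voff]
    exact hhi.i32 _ (by simp only []; omega) (by simp only []; omega)
  refine ⟨e_dim, e_ent, e_cl, e_sp, e_se, ?_⟩
  intro fr
  exact
    { lookup_type := by rw [e_lt]; exact fr.lookup_type
      lookup_values := by rw [e_lv]; exact fr.lookup_values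
      multiplicands := by rw [e_mu]; exact fr.multiplicands
      sorted_codewords := by rw [e_sc]; exact fr.sorted_codewords
      sorted_values := by rw [e_sv]; exact fr.sorted_values }

/-! ### 3. The exit assertion `InC6e` from the return of the allocator -/

/-- **`InC6Mid` over an allocator call** (`c6a_mid` of farm/worked/start_decoder.C6a, for any snapshot `Aw`): from `InC6Mid` at the
state `s` before the call (ghost `A`) and the results of `c6d_temp_call` / `c6d_temp_fail` at the returned state `w` (ghost `A'`):
`InC6Mid` at `w`, the struct's fields unchanged. `hlen`: the bytes of `lengths` (the temp block P1) are kept. -/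
theorem c6d_mid {u₀ : State} {g : Ghost} {i : Nat} {A2 A3 Ai Aw : Arena} {A A' : Arena × List Obj} {lengths : Nat}
    {pc pc' : Word} {s w : State} (h : InC6Mid u₀ g i A2 A3 Ai Aw A lengths pc s) (hF : Frame u₀ g pc' A' w)
    (hC : Cur g i A2 A3 Ai A' w) (hcb : g.cb w.mem i = g.cb s.mem i) (hkept : AllKept A.1.Blk s.mem w.mem)
    (hext : A.1.Extends A'.1) (hrbx : w.reg .rbx = s.reg .rbx)
    (hlen : (Block.mk lengths (Codebook.entries s.mem (g.cb s.mem i)).toNat).Kept s.mem w.mem) :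
    InC6Mid u₀ g i A2 A3 Ai Aw A' lengths pc' w ∧ Codebook.SameFields s.mem w.mem (g.cb s.mem i) := by
  have hcbOK := h.cur.ages.cbOK
  have hkI : AllKept Ai.Blk s.mem w.mem := fun B hB => hkept B (hB.mono h.cur.ages.exti)
  have hstruct : (Codebook.block (g.cb s.mem i)).Kept s.mem w.mem := hcbOK.cb_kept (hkI _ hcbOK.F2) i h.cur.lt
  have e := Codebook.SameFields.of_kept hstruct
  have hlenE := hlen.same
  have hlenI := hlen.inside
  simp only [vblock] at hlenE hlenI
  have hf := h.fresh
  refine ⟨?_, e⟩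
  exact
    { frame := hF
      cur := hC
      extw := h.extw
      extw' := h.extw'.trans hext
      k1 := by rw [hcb]; exact h.k1.frame e
      k2 := by rw [hcb]; exact h.k2.frame e
      rbx := by rw [hrbx]; exact h.rbx
      lenL := by rw [hcb, e.entries]; exact h.lenL.same hlenE hlenI
      fresh := by
        rw [hcb]
        exact ⟨⟨by rw [e.lookup_type]; exact hf.lookup_type, by rw [e.lookup_values]; exact hf.lookup_values,
          by rw [e.multiplicands]; exact hf.multiplicands⟩, by rw [e.sorted_codewords]; exact hf.sorted_codewords,
          by rw [e.sorted_values]; exact hf.sorted_values⟩ }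

/-- **`InC6e` (@cut132) from the return of the second `setup_temp_malloc(f, 4·SE)`**, both arms: `s` = the state before the call
(`codewords` = P2 stored), `w` = the returned state with `Frame` / `Cur` for the ghost `A'`. -/
theorem c6d_build {u₀ : State} {g : Ghost} {i : Nat} {A2 A3 Ai Aw : Arena} {A A' : Arena × List Obj} {lengths : Nat} {pc : Word}
    {s w : State} (h : InC6Mid u₀ g i A2 A3 Ai Aw A lengths pc s)
    (sparse1 : Codebook.sparse s.mem (g.cb s.mem i) = 1)
    (sl : Since Aw A.1
      ⟨Codebook.codeword_lengths s.mem (g.cb s.mem i), (Codebook.sorted_entries s.mem (g.cb s.mem i)).toNat⟩)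
    (cnt : CNT s.mem lengths (g.cb s.mem i))
    (hF : Frame u₀ g L.start_decoder.cut132 A' w) (hC : Cur g i A2 A3 Ai A' w)
    (hcb : g.cb w.mem i = g.cb s.mem i) (hkept : AllKept A.1.Blk s.mem w.mem) (hext : A.1.Extends A'.1)
    (hrbx : w.reg .rbx = s.reg .rbx)
    (hlen : (Block.mk lengths (Codebook.entries s.mem (g.cb s.mem i)).toNat).Kept s.mem w.mem)
    (hres : w.reg .rax = 0 ∨
      TempsAre A'.1
        [((w.reg .rax).toNat, 4 * (Codebook.sorted_entries s.mem (g.cb s.mem i)).toNat),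
         (Codebook.codewords s.mem (g.cb s.mem i), 4 * (Codebook.sorted_entries s.mem (g.cb s.mem i)).toNat),
         (lengths, (Codebook.entries s.mem (g.cb s.mem i)).toNat)]) :
    InC6e u₀ g i A2 A3 Ai Aw A' lengths w := by
  obtain ⟨hmid, e⟩ := c6d_mid h hF hC hcb hkept hext hrbx hlen
  have hlenE := hlen.same
  have hlenI := hlen.inside
  simp only [vblock] at hlenE hlenI
  exact
    { mid := hmid
      sparse1 := by rw [hcb, e.sparse]; exact sparse1
      sparse_lengths := by rw [hcb, e.codeword_lengths, e.sorted_entries]; exact sl.mono hext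
      cnt := by
        rw [hcb]
        unfold CNT at cnt ⊢
        rw [e.entries, e.sorted_entries, C7.usedCount_same hlenE hlenI]
        exact cnt
      res := by rw [hcb, e.entries, e.sorted_entries, e.codewords]; exact hres }

/-! ### 4. The machine side: where things are, the callee's precondition, `lea esi,[rax*4]` -/

/-- **A temp block lies inside the arena's buffer, above the struct `cb(i)`** (which is inside the codebooks block, a SETUP block:
below `B + S ≤ B + T`). WHEN: the bytes of `lengths` = P1 over the store into the struct. -/
theorem c6d_tblock_off_book {g : Ghost} {i : Nat} {A2 A3 Ai : Arena} {A : Arena × List Obj} {m : Mem}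
    (hm : MInv g i A2 A3 Ai A m) {p n : Nat} (hT : A.1.TBlock p n) :
    (A.1.B ≤ p ∧ p + n ≤ A.1.B + A.1.L) ∧ g.cb m i + 2120 ≤ p := by
  have ha : ArenaOK A.1 A.2 m g.f := hm.sd.arena
  have hlr := ha.tblock_range hT
  have hr8 := le_r8 n
  have hab := ha.bounds
  have hcbA : A.1.Blk (codebooksBlock m g.f) := hm.ages.cbOK.F2.mono hm.ages.exti
  have hbr := ha.block_range hcbA
  have hci := hm.ages.cbOK.cb_in i hm.lt
  simp only [vblock, voff] at hci hbr
  have hr8c := le_r8 (2120 * (stb_vorbis.codebook_count m g.f).toNat)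
  unfold Ghost.cb
  omega

/-- **A temp block is kept by the stores of the segment before its allocator call** (windows `C6dWin`: the stack, one field of the
struct, `f->error`). -/
theorem c6d_tblock_kept0 {g : Ghost} {i : Nat} {A2 A3 Ai : Arena} {A : Arena × List Obj} {m m' : Mem} {ws : List Span}
    {o : Nat} (ho : o + 8 ≤ 2120) (hpos : Pos g A) (hm : MInv g i A2 A3 Ai A m) (hs : Mem.SameExcept ws m m')
    (hok : ∀ w, w ∈ ws → C6dWin g (g.cb m i) o w) {p n : Nat} (hT : A.1.TBlock p n) : (Block.mk p n).Kept m m' := by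
  obtain ⟨hin, hd⟩ := c6d_tblock_off_book hm hT
  apply blk_kept0 hpos hs _ hin (Or.inr hd)
  intro w hw
  have k := hok w hw
  unfold C6dWin at k
  unfold OkWin0
  omega

/-- **Where `*f` is** (a stack object of stb_vorbis_open_memory, or an object of `A.2`): in the data space, and off the part of the
stack below the steady stack pointer `R` (`c6a_obj_where` of farm/worked/start_decoder.C6a). -/
theorem c6d_obj_where {g : Ghost} {i : Nat} {A2 A3 Ai : Arena} {A : Arena × List Obj} {v : State} (h : Cur g i A2 A3 Ai A v)
    (hsh : ShadowInv A.2 g.frames' g.R v.mem) (hoff : ∀ o, o ∈ A.2 → L.textHi ≤ o.base) :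
    0x119d40 ≤ g.f ∧ g.f + 1808 ≤ 0xC00000 ∧ (g.R ≤ g.f ∨ g.f + 1808 ≤ 0x700000 ∨ 0x800000 ≤ g.f) := by
  have hl : LiveIn A.2 g.frames' g.f Off.sizeof.stb_vorbis := by
    apply h.hand.obj.mono
    intro o ho
    unfold Ghost.frames'
    rw [stackObjs_cons]
    rcases List.mem_append.mp ho with hs | ho'
    · exact List.mem_append_left _ (List.mem_append_right _ hs)
    · exact List.mem_append_right _ ho'
  have hw := hl.where_ hsh hoff (by simp only [voff]; omega)
  simp only [voff] at hw
  exact hw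

/-- **`setup_temp_malloc`'s precondition at 0x114964**: the state `s` at the callee's entry has the memory of the state `v` (with
`Frame`, `Cur`) but for the pushed return address below `R` (`hmem`), `rsp = R − 8`, `rdi = f`. -/
theorem c6d_tmalloc_pre {u₀ : State} {g : Ghost} {i : Nat} {A2 A3 Ai : Arena} {A : Arena × List Obj} {pc : Word} {v s : State}
    (hfr : Frame u₀ g pc A v) (hcur : Cur g i A2 A3 Ai A v) (hun : ShadowUntouched v.mem s.mem)
    (hmem : Mem.EqOn (g.f + 112) (g.f + 136) v.mem s.mem) (hrsp : (s.reg .rsp).toNat + 8 = g.R)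
    (hrdi : (s.reg .rdi).toNat = g.f) : (setup_temp_malloc.spec A.2 g.frames' A.1).pre s := by
  have hob := hcur.sd.bits.OB1
  obtain ⟨hf1, hf2, _⟩ := c6d_obj_where hcur hfr.shadow hfr.offText
  refine ⟨⟨?_, hfr.offText⟩, ?_, ?_, hcur.hand.arenaText⟩
  · rw [hrsp]
    exact hfr.shadow.untouched hun
  · rw [hrdi]
    exact hcur.sd.env.live _ hob
  · rw [hrdi]
    apply hcur.sd.arena.frame (by simp only [voff]; omega)
    simp only [voff]
    exact hmem

/-- The walker's form of `lea esi, [rax*4]` for a value below 2^30. -/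
theorem c6d_lea4 (x : BitVec 32) (h : x.toNat < 2 ^ 30) :
    (Word.ofBV (BitVec.setWidth 32 (Word.ofBV x * 4).toBitVec)).toNat = 4 * x.toNat := by
  have e4 : (4 : Word).toNat = 4 := rfl
  rw [toNat_ofBV32, BitVec.toNat_setWidth, UInt64.toNat_toBitVec, UInt64.toNat_mul, toNat_ofBV32, e4]
  omega

end Vorbis.Spec.start_decoder_C6d
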